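-- pv_equiv track=rewrite | github.com/junbeom-kang/Baekjoon | CodingTest/카카오인턴쉽2021/1.py | solution
-- ===== SOURCE A (Python) =====
-- def solution(s):
--     k = 0
--     answer = ""
--     while k < len(s):
--         if 48 <= ord(s[k]) <= 57:
--             answer += s[k]
--             k += 1
--         else:
--             if s[k:k + 3] in dict3:
--                 answer += dict3[s[k:k + 3]]
--                 k += 3
--             elif s[k:k + 4] in dict4:
--                 answer += dict4[s[k:k + 4]]
--                 k += 4
--             else:
--                 answer += dict5[s[k:k + 5]]
--                 k += 5
--     return answer
--
-- dict3={
--     "one":"1","two":"2","six":"6"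
-- }
--
-- dict4={
--     "zero":"0","four":"4","five":"5","nine":"9"}
--
-- dict5={
--     "three":"3","seven":"7","eight":"8"
-- }
-- ===== SOURCE B (Python) =====
-- def solution(s):
--     # Backwards scan: every spelled-out digit word is uniquely identified by its
--     # last three letters.  table maps that 3-letter suffix to (digit, extra) where
--     # extra is how many letters the word has before the suffix (0, 1 or 2).
--     table = {"one": ("1", 0), "two": ("2", 0), "six": ("6", 0),
--              "ero": ("0", 1), "our": ("4", 1), "ive": ("5", 1), "ine": ("9", 1),
--              "ree": ("3", 2), "ven": ("7", 2), "ght": ("8", 2)}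
--     out = []
--     i = len(s)
--     while i > 0:
--         c = s[i - 1]
--         if '0' <= c <= '9':
--             out.append(c)
--             i -= 1
--         else:
--             d, extra = table[s[max(0, i - 3):i]]
--             out.append(d)
--             i -= 3 + extra
--     return "".join(reversed(out))
-- ===== Notes on version B (the rewrite author's own statement) =====
-- stated objective: alternative
-- what changed: A scans forward with a per-position try-3-then-4-then-5 window against three separate length-keyed dicts; B scans the string backwards with a single table keyed by each word's unique 3-letter suffix, appending digits and reversing once at the end.
import Mathlib
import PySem

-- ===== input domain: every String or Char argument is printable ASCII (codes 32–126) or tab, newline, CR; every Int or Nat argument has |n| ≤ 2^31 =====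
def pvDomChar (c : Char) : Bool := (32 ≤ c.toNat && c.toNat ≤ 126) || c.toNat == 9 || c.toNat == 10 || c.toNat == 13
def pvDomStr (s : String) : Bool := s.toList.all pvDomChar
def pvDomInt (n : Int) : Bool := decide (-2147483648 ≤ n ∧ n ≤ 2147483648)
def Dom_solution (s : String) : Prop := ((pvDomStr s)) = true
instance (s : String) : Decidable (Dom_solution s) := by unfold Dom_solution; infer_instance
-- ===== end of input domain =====

-- B replaces A's forward index-advancing matcher with three prefix dicts by a single
-- backwards scan keyed on each word's (unique) last three letters; equal on Pre_.

-- ===== PORT A =====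
-- A's three dicts, as association lists over the character lists of the keys.
def pyDict3 : List (List Char × Char) :=
  [(['o','n','e'],'1'), (['t','w','o'],'2'), (['s','i','x'],'6')]
def pyDict4 : List (List Char × Char) :=
  [(['z','e','r','o'],'0'), (['f','o','u','r'],'4'), (['f','i','v','e'],'5'), (['n','i','n','e'],'9')]
def pyDict5 : List (List Char × Char) :=
  [(['t','h','r','e','e'],'3'), (['s','e','v','e','n'],'7'), (['e','i','g','h','t'],'8')]

-- A's while loop: the remaining suffix s[k:] is the first argument, answer the second.
def loopA : List Char → List Char → List Char
  | [], ans => ans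
  | c :: rest, ans =>
    if '0' ≤ c ∧ c ≤ '9' then
      loopA rest (ans ++ [c])
    else
      match List.lookup ((c :: rest).take 3) pyDict3 with
      | some d => loopA ((c :: rest).drop 3) (ans ++ [d])
      | none =>
        match List.lookup ((c :: rest).take 4) pyDict4 with
        | some d => loopA ((c :: rest).drop 4) (ans ++ [d])
        | none =>
          match List.lookup ((c :: rest).take 5) pyDict5 with
          | some d => loopA ((c :: rest).drop 5) (ans ++ [d])
          | none => ans   -- Python raises KeyError here; excluded by Pre_solution
termination_by l _ => l.length
decreasing_by all_goals (simp [List.length_drop]; try omega)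

def solution (s : String) : String := String.ofList (loopA s.toList [])

-- ===== PORT B =====
-- B's table keyed by the last three letters of each word: (digit, extra letters
-- the word has before that suffix), so a match consumes 3 + extra characters.
def sufTable : List (List Char × (Char × Nat)) :=
  [(['o','n','e'],('1',0)), (['t','w','o'],('2',0)), (['s','i','x'],('6',0)),
   (['e','r','o'],('0',1)), (['o','u','r'],('4',1)), (['i','v','e'],('5',1)), (['i','n','e'],('9',1)),
   (['r','e','e'],('3',2)), (['v','e','n'],('7',2)), (['g','h','t'],('8',2))]

-- B's while loop: the first argument is the still-unprocessed prefix s[:i],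
-- out is the output in reversed order (Python appends, then reverses at the end).
def loopB : List Char → List Char → List Char
  | [], out => out
  | l@(_ :: _), out =>
    match l.getLast? with
    | none => out   -- unreachable: l is nonempty
    | some ch =>
      if '0' ≤ ch ∧ ch ≤ '9' then
        loopB l.dropLast (out ++ [ch])
      else
        match List.lookup (l.drop (l.length - 3)) sufTable with
        | some (d, e) => loopB (l.take (l.length - (3 + e))) (out ++ [d])
        | none => out   -- Python raises KeyError here; excluded by Pre_solution
termination_by l _ => l.length
decreasing_by all_goals (subst l; simp [List.length_dropLast, List.length_take]; try omega)

def solution_alt (s : String) : String := String.ofList ((loopB s.toList []).reverse)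

-- ===== PRECONDITION & SPEC =====
-- Pre_ excludes exactly the strings that are not a concatenation of decimal digits and
-- the ten spelled-out digit words: on those Python A raises KeyError (the dict5 fallback).
def pvValid : List Char → Bool
  | [] => true
  | 'o'::'n'::'e'::r => pvValid r
  | 't'::'w'::'o'::r => pvValid r
  | 's'::'i'::'x'::r => pvValid r
  | 'z'::'e'::'r'::'o'::r => pvValid r
  | 'f'::'o'::'u'::'r'::r => pvValid r
  | 'f'::'i'::'v'::'e'::r => pvValid r
  | 'n'::'i'::'n'::'e'::r => pvValid r
  | 't'::'h'::'r'::'e'::'e'::r => pvValid r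
  | 's'::'e'::'v'::'e'::'n'::r => pvValid r
  | 'e'::'i'::'g'::'h'::'t'::r => pvValid r
  | c :: r => ('0' ≤ c ∧ c ≤ '9') && pvValid r

def Pre_solution (s : String) : Prop := pvValid s.toList = true
instance (s : String) : Decidable (Pre_solution s) := by unfold Pre_solution; infer_instance

def pvWitness_solution : String := "2three45one"

def Spec_solution (s : String) (out : String) : Prop := out = solution_alt s
instance (s : String) (out : String) : Decidable (Spec_solution s out) := by unfold Spec_solution; infer_instance

-- ===== CLAIM (what is proved, stated in full; the proofs are below) =====
def Claim_equal_solution : Prop := ∀ (s : String), Dom_solution s → Pre_solution s → Spec_solution s (solution s)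

-- ===== LEMMAS AND PROOFS =====

-- A token of a valid string: either a single digit or one of the ten words (with its digit).
def wordToks : List (List Char × Char) :=
  [(['o','n','e'],'1'), (['t','w','o'],'2'), (['s','i','x'],'6'),
   (['z','e','r','o'],'0'), (['f','o','u','r'],'4'), (['f','i','v','e'],'5'), (['n','i','n','e'],'9'),
   (['t','h','r','e','e'],'3'), (['s','e','v','e','n'],'7'), (['e','i','g','h','t'],'8')]

def tokOk (t : List Char × Char) : Prop :=
  (t.1 = [t.2] ∧ '0' ≤ t.2 ∧ t.2 ≤ '9') ∨ t ∈ wordToks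

def flat (ts : List (List Char × Char)) : List Char := (ts.map Prod.fst).flatten

theorem flat_cons (w : List Char) (d : Char) (ts : List (List Char × Char)) :
    flat ((w, d) :: ts) = w ++ flat ts := by simp [flat]

theorem exists_step {r : List Char} (w : List Char) (d : Char) (hw : tokOk (w, d))
    (h : ∃ ts, (∀ t ∈ ts, tokOk t) ∧ r = flat ts) :
    ∃ ts, (∀ t ∈ ts, tokOk t) ∧ w ++ r = flat ts := by
  obtain ⟨ts, hts, rfl⟩ := h
  refine ⟨(w, d) :: ts, ?_, (flat_cons w d ts).symm⟩
  intro t ht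
  rcases List.mem_cons.1 ht with rfl | ht
  · exact hw
  · exact hts t ht

theorem valid_exists (l : List Char) (h : pvValid l = true) :
    ∃ ts, (∀ t ∈ ts, tokOk t) ∧ l = flat ts := by
  fun_induction pvValid l
  case case1 => exact ⟨[], by simp, rfl⟩
  case case2 r ih => exact exists_step ['o','n','e'] '1' (by simp [tokOk, wordToks]) (ih h)
  case case3 r ih => exact exists_step ['t','w','o'] '2' (by simp [tokOk, wordToks]) (ih h)
  case case4 r ih => exact exists_step ['s','i','x'] '6' (by simp [tokOk, wordToks]) (ih h)
  case case5 r ih => exact exists_step ['z','e','r','o'] '0' (by simp [tokOk, wordToks]) (ih h)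
  case case6 r ih => exact exists_step ['f','o','u','r'] '4' (by simp [tokOk, wordToks]) (ih h)
  case case7 r ih => exact exists_step ['f','i','v','e'] '5' (by simp [tokOk, wordToks]) (ih h)
  case case8 r ih => exact exists_step ['n','i','n','e'] '9' (by simp [tokOk, wordToks]) (ih h)
  case case9 r ih => exact exists_step ['t','h','r','e','e'] '3' (by simp [tokOk, wordToks]) (ih h)
  case case10 r ih => exact exists_step ['s','e','v','e','n'] '7' (by simp [tokOk, wordToks]) (ih h)
  case case11 r ih => exact exists_step ['e','i','g','h','t'] '8' (by simp [tokOk, wordToks]) (ih h)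
  case case12 c r h1 h2 h3 h4 h5 h6 h7 h8 h9 h10 ih =>
    rw [Bool.and_eq_true, decide_eq_true_eq] at h
    exact exists_step [c] c (Or.inl ⟨rfl, h.1⟩) (ih h.2)

theorem loopA_word (w : List Char) (d : Char) (hw : (w, d) ∈ wordToks) (x acc : List Char) :
    loopA (w ++ x) acc = loopA x (acc ++ [d]) := by
  fin_cases hw <;> simp [loopA, pyDict3, pyDict4, pyDict5, List.lookup]

theorem loopA_flat (ts : List (List Char × Char)) (h : ∀ t ∈ ts, tokOk t) (acc : List Char) :
    loopA (flat ts) acc = acc ++ ts.map Prod.snd := by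
  induction ts generalizing acc with
  | nil => simp [flat, loopA]
  | cons t ts ih =>
    obtain ⟨w, d⟩ := t
    rw [flat_cons]
    rcases h (w, d) List.mem_cons_self with hdig | hmem
    · obtain ⟨hw, hd⟩ := hdig
      simp only at hw
      subst hw
      rw [show ([d] ++ flat ts : List Char) = d :: flat ts from rfl]
      rw [show loopA (d :: flat ts) acc = loopA (flat ts) (acc ++ [d]) from by
            simp [loopA, if_pos hd]]
      rw [ih (fun t ht => h t (List.mem_cons_of_mem _ ht))]; simp
    · rw [loopA_word w d hmem]
      rw [ih (fun t ht => h t (List.mem_cons_of_mem _ ht))]; simp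

theorem loopB_digit (c : Char) (hc : '0' ≤ c ∧ c ≤ '9') (x out : List Char) :
    loopB (x ++ [c]) out = loopB x (out ++ [c]) := by
  cases x with
  | nil => simp [loopB, hc]
  | cons y ys =>
    rw [show ((y::ys) ++ [c] : List Char) = y :: (ys ++ [c]) from rfl, loopB.eq_def]
    have hlast : (y :: (ys ++ [c])).getLast? = some c := by
      rw [show (y :: (ys ++ [c]) : List Char) = (y::ys) ++ [c] from rfl, List.getLast?_concat]
    have hdl : (y :: (ys ++ [c])).dropLast = y :: ys := by
      rw [show (y :: (ys ++ [c]) : List Char) = (y::ys) ++ [c] from rfl, List.dropLast_concat]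
    simp [hlast, hdl, hc]

theorem loopB_one (x out : List Char) :
    loopB (x ++ ['o','n','e']) out = loopB x (out ++ ['1']) := by
  cases x with
  | nil => simp [loopB, sufTable]
  | cons y ys =>
    rw [show ((y::ys) ++ ['o','n','e'] : List Char) = y :: (ys ++ ['o','n','e']) from rfl, loopB.eq_def]
    have hlast : (y :: (ys ++ ['o','n','e'])).getLast? = some 'e' := by
      rw [show (y :: (ys ++ ['o','n','e']) : List Char) = (y::ys) ++ ['o','n','e'] from rfl, List.getLast?_append]
      rfl
    simp [hlast, sufTable]

theorem loopB_two (x out : List Char) :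
    loopB (x ++ ['t','w','o']) out = loopB x (out ++ ['2']) := by
  cases x with
  | nil => simp [loopB, sufTable, List.lookup]
  | cons y ys =>
    rw [show ((y::ys) ++ ['t','w','o'] : List Char) = y :: (ys ++ ['t','w','o']) from rfl, loopB.eq_def]
    have hlast : (y :: (ys ++ ['t','w','o'])).getLast? = some 'o' := by
      rw [show (y :: (ys ++ ['t','w','o']) : List Char) = (y::ys) ++ ['t','w','o'] from rfl, List.getLast?_append]
      rfl
    simp [hlast, sufTable, List.lookup]

theorem loopB_six (x out : List Char) :
    loopB (x ++ ['s','i','x']) out = loopB x (out ++ ['6']) := by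
  cases x with
  | nil => simp [loopB, sufTable, List.lookup]
  | cons y ys =>
    rw [show ((y::ys) ++ ['s','i','x'] : List Char) = y :: (ys ++ ['s','i','x']) from rfl, loopB.eq_def]
    have hlast : (y :: (ys ++ ['s','i','x'])).getLast? = some 'x' := by
      rw [show (y :: (ys ++ ['s','i','x']) : List Char) = (y::ys) ++ ['s','i','x'] from rfl, List.getLast?_append]
      rfl
    simp [hlast, sufTable, List.lookup]

theorem loopB_zero (x out : List Char) :
    loopB (x ++ ['z','e','r','o']) out = loopB x (out ++ ['0']) := by
  cases x with
  | nil => simp [loopB, sufTable, List.lookup]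
  | cons y ys =>
    rw [show ((y::ys) ++ ['z','e','r','o'] : List Char) = y :: (ys ++ ['z','e','r','o']) from rfl, loopB.eq_def]
    have hlast : (y :: (ys ++ ['z','e','r','o'])).getLast? = some 'o' := by
      rw [show (y :: (ys ++ ['z','e','r','o']) : List Char) = (y::ys) ++ ['z','e','r','o'] from rfl, List.getLast?_append]
      rfl
    simp [hlast, sufTable, List.lookup]

theorem loopB_four (x out : List Char) :
    loopB (x ++ ['f','o','u','r']) out = loopB x (out ++ ['4']) := by
  cases x with
  | nil => simp [loopB, sufTable, List.lookup]
  | cons y ys =>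
    rw [show ((y::ys) ++ ['f','o','u','r'] : List Char) = y :: (ys ++ ['f','o','u','r']) from rfl, loopB.eq_def]
    have hlast : (y :: (ys ++ ['f','o','u','r'])).getLast? = some 'r' := by
      rw [show (y :: (ys ++ ['f','o','u','r']) : List Char) = (y::ys) ++ ['f','o','u','r'] from rfl, List.getLast?_append]
      rfl
    simp [hlast, sufTable, List.lookup]

theorem loopB_five (x out : List Char) :
    loopB (x ++ ['f','i','v','e']) out = loopB x (out ++ ['5']) := by
  cases x with
  | nil => simp [loopB, sufTable, List.lookup]
  | cons y ys =>
    rw [show ((y::ys) ++ ['f','i','v','e'] : List Char) = y :: (ys ++ ['f','i','v','e']) from rfl, loopB.eq_def]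
    have hlast : (y :: (ys ++ ['f','i','v','e'])).getLast? = some 'e' := by
      rw [show (y :: (ys ++ ['f','i','v','e']) : List Char) = (y::ys) ++ ['f','i','v','e'] from rfl, List.getLast?_append]
      rfl
    simp [hlast, sufTable, List.lookup]

theorem loopB_nine (x out : List Char) :
    loopB (x ++ ['n','i','n','e']) out = loopB x (out ++ ['9']) := by
  cases x with
  | nil => simp [loopB, sufTable, List.lookup]
  | cons y ys =>
    rw [show ((y::ys) ++ ['n','i','n','e'] : List Char) = y :: (ys ++ ['n','i','n','e']) from rfl, loopB.eq_def]
    have hlast : (y :: (ys ++ ['n','i','n','e'])).getLast? = some 'e' := by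
      rw [show (y :: (ys ++ ['n','i','n','e']) : List Char) = (y::ys) ++ ['n','i','n','e'] from rfl, List.getLast?_append]
      rfl
    simp [hlast, sufTable, List.lookup]

theorem loopB_three (x out : List Char) :
    loopB (x ++ ['t','h','r','e','e']) out = loopB x (out ++ ['3']) := by
  cases x with
  | nil => simp [loopB, sufTable, List.lookup]
  | cons y ys =>
    rw [show ((y::ys) ++ ['t','h','r','e','e'] : List Char) = y :: (ys ++ ['t','h','r','e','e']) from rfl, loopB.eq_def]
    have hlast : (y :: (ys ++ ['t','h','r','e','e'])).getLast? = some 'e' := by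
      rw [show (y :: (ys ++ ['t','h','r','e','e']) : List Char) = (y::ys) ++ ['t','h','r','e','e'] from rfl, List.getLast?_append]
      rfl
    simp [hlast, sufTable, List.lookup]

theorem loopB_seven (x out : List Char) :
    loopB (x ++ ['s','e','v','e','n']) out = loopB x (out ++ ['7']) := by
  cases x with
  | nil => simp [loopB, sufTable, List.lookup]
  | cons y ys =>
    rw [show ((y::ys) ++ ['s','e','v','e','n'] : List Char) = y :: (ys ++ ['s','e','v','e','n']) from rfl, loopB.eq_def]
    have hlast : (y :: (ys ++ ['s','e','v','e','n'])).getLast? = some 'n' := by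
      rw [show (y :: (ys ++ ['s','e','v','e','n']) : List Char) = (y::ys) ++ ['s','e','v','e','n'] from rfl, List.getLast?_append]
      rfl
    simp [hlast, sufTable, List.lookup]

theorem loopB_eight (x out : List Char) :
    loopB (x ++ ['e','i','g','h','t']) out = loopB x (out ++ ['8']) := by
  cases x with
  | nil => simp [loopB, sufTable, List.lookup]
  | cons y ys =>
    rw [show ((y::ys) ++ ['e','i','g','h','t'] : List Char) = y :: (ys ++ ['e','i','g','h','t']) from rfl, loopB.eq_def]
    have hlast : (y :: (ys ++ ['e','i','g','h','t'])).getLast? = some 't' := by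
      rw [show (y :: (ys ++ ['e','i','g','h','t']) : List Char) = (y::ys) ++ ['e','i','g','h','t'] from rfl, List.getLast?_append]
      rfl
    simp [hlast, sufTable, List.lookup]

theorem loopB_flat (ts : List (List Char × Char)) (h : ∀ t ∈ ts, tokOk t) (out : List Char) :
    loopB (flat ts) out = out ++ (ts.map Prod.snd).reverse := by
  induction ts using List.reverseRecOn generalizing out with
  | nil => simp [flat, loopB]
  | append_singleton ts t ih =>
    obtain ⟨w, d⟩ := t
    have hflat : flat (ts ++ [(w, d)]) = flat ts ++ w := by simp [flat]
    have hts : ∀ t ∈ ts, tokOk t := fun t ht => h t (List.mem_append_left _ ht)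
    have ihx := fun out => ih hts out
    rw [hflat]
    rcases h (w, d) (List.mem_append_right _ List.mem_cons_self) with hdig | hmem
    · obtain ⟨hw, hd⟩ := hdig
      simp only at hw
      subst hw
      rw [loopB_digit d hd, ihx]; simp
    · simp only [wordToks, List.mem_cons, List.not_mem_nil, or_false, Prod.mk.injEq] at hmem
      rcases hmem with ⟨rfl, rfl⟩ | ⟨rfl, rfl⟩ | ⟨rfl, rfl⟩ | ⟨rfl, rfl⟩ | ⟨rfl, rfl⟩ | ⟨rfl, rfl⟩ | ⟨rfl, rfl⟩ | ⟨rfl, rfl⟩ | ⟨rfl, rfl⟩ | ⟨rfl, rfl⟩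
      · rw [loopB_one, ihx]; simp
      · rw [loopB_two, ihx]; simp
      · rw [loopB_six, ihx]; simp
      · rw [loopB_zero, ihx]; simp
      · rw [loopB_four, ihx]; simp
      · rw [loopB_five, ihx]; simp
      · rw [loopB_nine, ihx]; simp
      · rw [loopB_three, ihx]; simp
      · rw [loopB_seven, ihx]; simp
      · rw [loopB_eight, ihx]; simp

-- ===== VERDICT (by name: the statement is the Claim_ definition above) =====
theorem solution_spec : Claim_equal_solution := by
  intro s _hdom hpre
  unfold Spec_solution
  obtain ⟨ts, hts, hl⟩ := valid_exists s.toList hpre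
  simp [solution, solution_alt, hl, loopA_flat ts hts, loopB_flat ts hts]
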